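-- pv_equiv track=rewrite | github.com/zidarsk8/aoc22 | test_16.py | filter_states
-- ===== SOURCE A (Python) =====
-- from collections import defaultdict
--
-- def filter_states(states):
--
--     seen = defaultdict(dict)
--     for pos, rate, opened, flow in states:
--         seen[pos][opened] = (rate, flow)
--
--     result = set()
--     for pos, group in seen.items():
--         group_sets = [set(k) for k in group]
--         for k, item in group.items():
--             if any(set(k) < s for s in group_sets):
--                 continue
--             result.add((pos, item[0], k, item[1]))
--
--     return result
-- ===== SOURCE B (Python) =====
-- def filter_states(states):
--     seen = {}
--     for pos, rate, opened, flow in states: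
--         seen.setdefault(pos, {})[opened] = (rate, flow)
--
--     result = set()
--     for pos, group in seen.items():
--         order = sorted(group, key=lambda k: len(set(k)), reverse=True)
--         kept = []
--         alive = set()
--         for k in order:
--             s = set(k)
--             if any(s < t for t in kept):
--                 continue
--             kept.append(s)
--             alive.add(k)
--         for k, item in group.items():
--             if k in alive:
--                 result.add((pos, item[0], k, item[1]))
--     return result
-- ===== Notes on version B (the rewrite author's own statement) =====
-- stated objective: alternative
-- what changed: Per position-group, the O(g^2) all-pairs strict-subset scan is replaced by sorting the group's keys by set size descending and a single pass that maintains only the maximal sets kept so far, flagging surviving keys and emitting them in original dict order.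
import Mathlib
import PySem

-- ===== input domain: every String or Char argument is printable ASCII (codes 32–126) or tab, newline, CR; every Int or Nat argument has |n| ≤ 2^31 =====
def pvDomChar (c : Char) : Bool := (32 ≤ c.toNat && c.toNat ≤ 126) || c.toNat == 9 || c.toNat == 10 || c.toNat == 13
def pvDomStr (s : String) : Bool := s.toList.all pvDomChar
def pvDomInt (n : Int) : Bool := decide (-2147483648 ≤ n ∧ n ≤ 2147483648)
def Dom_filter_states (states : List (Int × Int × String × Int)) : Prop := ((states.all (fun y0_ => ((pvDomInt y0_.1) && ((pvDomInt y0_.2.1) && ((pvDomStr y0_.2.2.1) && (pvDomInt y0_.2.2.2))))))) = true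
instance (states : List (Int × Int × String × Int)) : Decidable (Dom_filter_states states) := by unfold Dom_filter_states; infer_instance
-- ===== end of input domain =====

-- B replaces A's per-group all-pairs strict-subset scan by sorting the group's keys by
-- set size descending and a single pass that keeps only maximal sets; same return value.

-- shared helpers (Python's set(k) and '<' on sets, used by both ports)
def pvCharSet (k : String) : List Char := PySem.Set.ofList k.toList

def pvSub (a b : List Char) : Bool := a.all (fun c => b.contains c)

def pvSetLt (a b : List Char) : Bool := pvSub a b && !pvSub b a

-- ===== PORT A =====
-- A's grouping loop: seen = defaultdict(dict); seen[pos][opened] = (rate, flow)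
def pvBuildSeen (states : List (Int × Int × String × Int)) :
    PySem.Dict Int (PySem.Dict String (Int × Int)) :=
  states.foldl
    (fun d st =>
      d.insert st.1 ((d.getD st.1 ⟨[]⟩).insert st.2.2.1 (st.2.1, st.2.2.2)))
    ⟨[]⟩

def filter_states (states : List (Int × Int × String × Int)) : List (Int × Int × String × Int) :=
  let seen := pvBuildSeen states
  seen.items.foldl
    (fun result pg =>
      let group := pg.2
      let group_sets := group.keys.map pvCharSet
      group.items.foldl
        (fun result ki =>
          if group_sets.any (fun s => pvSetLt (pvCharSet ki.1) s) then result
          else PySem.Set.add result (pg.1, ki.2.1, ki.1, ki.2.2))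
        result)
    []

-- ===== PORT B =====
-- B's grouping loop: seen = {}; seen.setdefault(pos, {})[opened] = (rate, flow)
def pvBuildSeenB (states : List (Int × Int × String × Int)) :
    PySem.Dict Int (PySem.Dict String (Int × Int)) :=
  states.foldl
    (fun d st =>
      let d1 := d.setdefault st.1 ⟨[]⟩
      d1.insert st.1 ((d1.getD st.1 ⟨[]⟩).insert st.2.2.1 (st.2.1, st.2.2.2)))
    ⟨[]⟩

-- the body of B's first inner loop (maximal-set scan): state = (kept, alive)
def pvStep (ka : List (List Char) × PySem.Set String) (k : String) :
    List (List Char) × PySem.Set String :=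
  let s := pvCharSet k
  if ka.1.any (fun t => pvSetLt s t) then ka
  else (ka.1 ++ [s], PySem.Set.add ka.2 k)

def filter_states_alt (states : List (Int × Int × String × Int)) : List (Int × Int × String × Int) :=
  let seen := pvBuildSeenB states
  seen.items.foldl
    (fun result pg =>
      let group := pg.2
      let order := PySem.List.sorted group.keys (fun k => (pvCharSet k).length) true
      let ka := order.foldl pvStep ([], [])
      group.items.foldl
        (fun result ki =>
          if PySem.Set.contains ka.2 ki.1 then
            PySem.Set.add result (pg.1, ki.2.1, ki.1, ki.2.2)
          else result)
        result)
    []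

-- ===== PRECONDITION & SPEC =====
def Spec_filter_states (states : List (Int × Int × String × Int)) (out : List (Int × Int × String × Int)) : Prop := out = filter_states_alt states
instance (states : List (Int × Int × String × Int)) (out : List (Int × Int × String × Int)) : Decidable (Spec_filter_states states out) := by unfold Spec_filter_states; infer_instance

-- ===== CLAIM (what is proved, stated in full; the proofs are below) =====
def Claim_equal_filter_states : Prop := ∀ (states : List (Int × Int × String × Int)), Dom_filter_states states → Spec_filter_states states (filter_states states)

-- ===== LEMMAS AND PROOFS =====

lemma pvSub_iff (a b : List Char) : pvSub a b = true ↔ ∀ c ∈ a, c ∈ b := by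
  simp [pvSub]

lemma pvSetLt_iff (a b : List Char) :
    pvSetLt a b = true ↔ (pvSub a b = true ∧ pvSub b a = false) := by
  simp [pvSetLt]

lemma pvSetLt_irrefl (a : List Char) : pvSetLt a a = false := by
  simp [pvSetLt]

lemma pvSub_trans {a b c : List Char} (h1 : pvSub a b = true) (h2 : pvSub b c = true) :
    pvSub a c = true := by
  rw [pvSub_iff] at *
  exact fun x hx => h2 _ (h1 _ hx)

lemma pvSetLt_trans_sub {a b c : List Char} (h : pvSetLt a b = true)
    (hbc : pvSub b c = true) : pvSetLt a c = true := by
  rw [pvSetLt_iff] at h ⊢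
  refine ⟨pvSub_trans h.1 hbc, ?_⟩
  by_contra hca
  have hca' : pvSub c a = true := by
    cases hc : pvSub c a
    · exact absurd hc hca
    · rfl
  have : pvSub b a = true := pvSub_trans hbc hca'
  rw [h.2] at this; exact Bool.false_ne_true this

lemma pvContains_iff {α : Type} [BEq α] [LawfulBEq α] (s : PySem.Set α) (x : α) :
    PySem.Set.contains s x = true ↔ x ∈ s := by
  simp [PySem.Set.contains]

lemma pvSetLt_length {a b : List Char} (ha : a.Nodup) (hb : b.Nodup)
    (h : pvSetLt a b = true) : a.length < b.length := by
  rw [pvSetLt_iff] at h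
  have hab : ∀ c ∈ a, c ∈ b := (pvSub_iff _ _).1 h.1
  have hsub : a.toFinset ⊆ b.toFinset := by
    intro x hx
    exact List.mem_toFinset.2 (hab x (List.mem_toFinset.1 hx))
  have hca : a.toFinset.card = a.length := List.toFinset_card_of_nodup ha
  have hcb : b.toFinset.card = b.length := List.toFinset_card_of_nodup hb
  rcases lt_or_eq_of_le (Finset.card_le_card hsub) with hlt | heq
  · omega
  · exfalso
    have heqf : a.toFinset = b.toFinset :=
      Finset.eq_of_subset_of_card_le hsub (le_of_eq heq.symm)
    have hba : pvSub b a = true := (pvSub_iff _ _).2 (fun x hx =>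
      List.mem_toFinset.1 (heqf ▸ List.mem_toFinset.2 hx))
    rw [h.2] at hba
    exact Bool.false_ne_true hba

lemma pvCharSet_nodup (k : String) : (pvCharSet k).Nodup :=
  PySem.Set.nodup_ofList _

-- the maximal-set scan: a key is alive iff it was already alive or it occurs in l and its
-- char-set is not a strict subset of any initially-kept set or any char-set from l
lemma pvScan_contains (l : List String) (ka : List (List Char) × PySem.Set String)
    (hnd : l.Nodup)
    (hpw : l.Pairwise (fun a b => (pvCharSet b).length ≤ (pvCharSet a).length)) (k : String) :
    PySem.Set.contains ((l.foldl pvStep ka).2) k = true ↔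
      (PySem.Set.contains ka.2 k = true ∨
        (k ∈ l ∧ ¬ ∃ s, (s ∈ ka.1 ∨ ∃ k', k' ∈ l ∧ s = pvCharSet k') ∧ pvSetLt (pvCharSet k) s = true)) := by
  induction l generalizing ka with
  | nil => simp
  | cons x xs ih =>
      have hx_notin : x ∉ xs := (List.nodup_cons.1 hnd).1
      have hnd' : xs.Nodup := (List.nodup_cons.1 hnd).2
      have hx_le : ∀ b ∈ xs, (pvCharSet b).length ≤ (pvCharSet x).length :=
        (List.pairwise_cons.1 hpw).1
      have hpw' : xs.Pairwise (fun a b => (pvCharSet b).length ≤ (pvCharSet a).length) :=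
        (List.pairwise_cons.1 hpw).2
      rw [List.foldl_cons]
      by_cases hdrop : ka.1.any (fun t => pvSetLt (pvCharSet x) t) = true
      · have hstep : pvStep ka x = ka := by simp [pvStep, hdrop]
        rw [hstep, ih ka hnd' hpw']
        obtain ⟨t, ht, hlt_xt⟩ := List.any_eq_true.1 hdrop
        constructor
        · rintro (hc | ⟨hkxs, hno⟩)
          · exact Or.inl hc
          · refine Or.inr ⟨List.mem_cons_of_mem _ hkxs, ?_⟩
            rintro ⟨s, hs, hlt⟩
            rcases hs with hs | ⟨k', hk', hse⟩
            · exact hno ⟨s, Or.inl hs, hlt⟩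
            · rcases List.mem_cons.1 hk' with rfl | hk'xs
              · subst hse
                exact hno ⟨t, Or.inl ht, pvSetLt_trans_sub hlt ((pvSetLt_iff _ _).1 hlt_xt).1⟩
              · exact hno ⟨s, Or.inr ⟨k', hk'xs, hse⟩, hlt⟩
        · rintro (hc | ⟨hkl, hno⟩)
          · exact Or.inl hc
          · rcases List.mem_cons.1 hkl with rfl | hkxs
            · exact absurd ⟨t, Or.inl ht, hlt_xt⟩ hno
            · refine Or.inr ⟨hkxs, ?_⟩
              rintro ⟨s, hs, hlt⟩
              rcases hs with hs | ⟨k', hk', hse⟩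
              · exact hno ⟨s, Or.inl hs, hlt⟩
              · exact hno ⟨s, Or.inr ⟨k', List.mem_cons_of_mem _ hk', hse⟩, hlt⟩
      · have hdropf : ka.1.any (fun t => pvSetLt (pvCharSet x) t) = false :=
          Bool.not_eq_true _ ▸ by simpa using hdrop
        have hnolt : ∀ t ∈ ka.1, pvSetLt (pvCharSet x) t = false := by
          intro t ht
          exact Bool.eq_false_iff.2 ((List.any_eq_false.1 hdropf) t ht)
        have hstep : pvStep ka x = (ka.1 ++ [pvCharSet x], PySem.Set.add ka.2 x) := by
          simp [pvStep, hdropf]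
        rw [hstep, ih _ hnd' hpw']
        have hcand : ∀ s, ((s ∈ ka.1 ++ [pvCharSet x] ∨ ∃ k', k' ∈ xs ∧ s = pvCharSet k') ↔
            (s ∈ ka.1 ∨ ∃ k', k' ∈ x :: xs ∧ s = pvCharSet k')) := by
          intro s
          constructor
          · rintro (hs | ⟨k', hk', hse⟩)
            · rcases List.mem_append.1 hs with hs | hs
              · exact Or.inl hs
              · exact Or.inr ⟨x, List.mem_cons_self .., by simpa using hs⟩
            · exact Or.inr ⟨k', List.mem_cons_of_mem _ hk', hse⟩
          · rintro (hs | ⟨k', hk', hse⟩)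
            · exact Or.inl (List.mem_append.2 (Or.inl hs))
            · rcases List.mem_cons.1 hk' with rfl | hk'xs
              · exact Or.inl (List.mem_append.2 (Or.inr (by simp [hse])))
              · exact Or.inr ⟨k', hk'xs, hse⟩
        have hconsadd : PySem.Set.contains (PySem.Set.add ka.2 x) k = true ↔
            (PySem.Set.contains ka.2 k = true ∨ k = x) := by
          rw [pvContains_iff, PySem.Set.mem_add, pvContains_iff]
        have hEx : k = x → ¬ ∃ s, (s ∈ ka.1 ∨ ∃ k', k' ∈ x :: xs ∧ s = pvCharSet k') ∧
            pvSetLt (pvCharSet k) s = true := by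
          rintro rfl ⟨s, hs, hlt⟩
          rcases hs with hs | ⟨k', hk', hse⟩
          · rw [hnolt s hs] at hlt; exact Bool.false_ne_true hlt
          · rcases List.mem_cons.1 hk' with rfl | hk'xs
            · subst hse; rw [pvSetLt_irrefl] at hlt; exact Bool.false_ne_true hlt
            · subst hse
              have := pvSetLt_length (pvCharSet_nodup k) (pvCharSet_nodup k') hlt
              exact absurd (hx_le k' hk'xs) (by omega)
        rw [hconsadd]
        constructor
        · rintro ((hc | rfl) | ⟨hkxs, hno⟩)
          · exact Or.inl hc
          · exact Or.inr ⟨List.mem_cons_self .., hEx rfl⟩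
          · exact Or.inr ⟨List.mem_cons_of_mem _ hkxs, fun ⟨s, hs, hlt⟩ =>
              hno ⟨s, (hcand s).2 hs, hlt⟩⟩
        · rintro (hc | ⟨hkl, hno⟩)
          · exact Or.inl (Or.inl hc)
          · rcases List.mem_cons.1 hkl with rfl | hkxs
            · exact Or.inl (Or.inr rfl)
            · exact Or.inr ⟨hkxs, fun ⟨s, hs, hlt⟩ => hno ⟨s, (hcand s).1 hs, hlt⟩⟩

lemma pvCond (g : PySem.Dict String (Int × Int)) (hnd : g.keys.Nodup)
    (k : String) (hk : k ∈ g.keys) :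
    PySem.Set.contains
        (((PySem.List.sorted g.keys (fun k => (pvCharSet k).length) true).foldl pvStep ([], [])).2) k
      = !((g.keys.map pvCharSet).any (fun s => pvSetLt (pvCharSet k) s)) := by
  have hperm := PySem.List.sorted_perm g.keys (fun k => (pvCharSet k).length) true
  have hnd' : (PySem.List.sorted g.keys (fun k => (pvCharSet k).length) true).Nodup :=
    hperm.nodup_iff.2 hnd
  have hpw := PySem.List.sorted_pairwise_rev g.keys (fun k => (pvCharSet k).length)
  have h := pvScan_contains _ ([], []) hnd' hpw k
  have hmem : k ∈ PySem.List.sorted g.keys (fun k => (pvCharSet k).length) true :=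
    (PySem.List.mem_sorted _ _ _ _).2 hk
  cases hA : (g.keys.map pvCharSet).any (fun s => pvSetLt (pvCharSet k) s) with
  | false =>
      rw [Bool.not_false]
      refine h.2 (Or.inr ⟨hmem, ?_⟩)
      rintro ⟨s, hs, hlt⟩
      rcases hs with hs | ⟨k', hk', hse⟩
      · simp at hs
      · have hk'keys : k' ∈ g.keys := (PySem.List.mem_sorted _ _ _ _).1 hk'
        have : pvSetLt (pvCharSet k) (pvCharSet k') = false :=
          Bool.eq_false_iff.2 ((List.any_eq_false.1 hA) _ (List.mem_map.2 ⟨k', hk'keys, rfl⟩))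
        rw [hse] at hlt
        rw [this] at hlt
        exact Bool.false_ne_true hlt
  | true =>
      rw [Bool.not_true]
      cases hc : PySem.Set.contains ((PySem.List.sorted g.keys (fun k => (pvCharSet k).length) true).foldl pvStep ([], [])).2 k with
      | false => rfl
      | true =>
          exfalso
          rcases h.1 hc with hc' | ⟨_, hno⟩
          · simp [PySem.Set.contains] at hc'
          · obtain ⟨s, hsm, hlt⟩ := List.any_eq_true.1 hA
            obtain ⟨k', hk'keys, rfl⟩ := List.mem_map.1 hsm
            exact hno ⟨pvCharSet k', Or.inr ⟨k', (PySem.List.mem_sorted _ _ _ _).2 hk'keys, rfl⟩, hlt⟩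

lemma pvInsert_mem_items {κ ν : Type} [BEq κ] (d : PySem.Dict κ ν) (k : κ) (v : ν)
    {p : κ} {g : ν} (h : (p, g) ∈ (d.insert k v).items) : g = v ∨ (p, g) ∈ d.items := by
  unfold PySem.Dict.insert at h
  split at h
  · simp only [] at h
    obtain ⟨q, hq, he⟩ := List.mem_map.1 h
    by_cases hqk : (q.1 == k) = true
    · simp [hqk] at he; exact Or.inl he.2.symm
    · simp [hqk] at he; right; rw [← he]; exact hq
  · rcases List.mem_append.1 h with h' | h'
    · exact Or.inr h'
    · simp at h'; exact Or.inl h'.2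

lemma pvGetD_cases {κ ν : Type} [BEq κ] (d : PySem.Dict κ ν) (k : κ) (dflt : ν) :
    d.getD k dflt = dflt ∨ ∃ p, (p, d.getD k dflt) ∈ d.items := by
  unfold PySem.Dict.getD PySem.Dict.get?
  cases hf : List.find? (fun p => p.1 == k) d.items with
  | none => simp
  | some q =>
      right
      exact ⟨q.1, by simpa using List.mem_of_find?_eq_some hf⟩

lemma pvDict_insert_keys_nodup {κ ν : Type} [BEq κ] [LawfulBEq κ] (d : PySem.Dict κ ν)
    (k : κ) (v : ν) (h : d.keys.Nodup) : (d.insert k v).keys.Nodup := by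
  have := PySem.Dict.nodup_keys_foldl_insert [k] (fun _ _ => v) d h
  simpa using this

lemma pvSeen_values_nodup (states : List (Int × Int × String × Int)) :
    ∀ p g, (p, g) ∈ (pvBuildSeen states).items → g.keys.Nodup := by
  suffices h : ∀ (l : List (Int × Int × String × Int)) (d : PySem.Dict Int (PySem.Dict String (Int × Int))),
      (∀ p g, (p, g) ∈ d.items → g.keys.Nodup) →
      ∀ p g, (p, g) ∈ (l.foldl (fun d st => d.insert st.1 ((d.getD st.1 ⟨[]⟩).insert st.2.2.1 (st.2.1, st.2.2.2))) d).items → g.keys.Nodup by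
    exact h states ⟨[]⟩ (by simp)
  intro l
  induction l with
  | nil => intro d hd; simpa using hd
  | cons x xs ih =>
      intro d hd p g hmem
      refine ih _ ?_ p g (by simpa using hmem)
      intro p' g' h'
      rcases pvInsert_mem_items _ _ _ h' with h' | h'
      · subst h'
        have hin : (d.getD x.1 ⟨[]⟩).keys.Nodup := by
          rcases pvGetD_cases d x.1 ⟨[]⟩ with he | ⟨q, hq⟩
          · rw [he]; simp [PySem.Dict.keys]
          · exact hd _ _ hq
        exact pvDict_insert_keys_nodup _ _ _ hin
      · exact hd _ _ h'

lemma pvBuildSeenB_eq (states : List (Int × Int × String × Int)) :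
    pvBuildSeenB states = pvBuildSeen states := by
  unfold pvBuildSeenB pvBuildSeen
  apply PySem.List.foldl_congr_mem
  intro d st _
  show (d.setdefault st.1 ⟨[]⟩).insert st.1
      (((d.setdefault st.1 ⟨[]⟩).getD st.1 ⟨[]⟩).insert st.2.2.1 (st.2.1, st.2.2.2)) = _
  rw [PySem.Dict.getD_setdefault_self]
  by_cases hc : d.contains st.1 = true
  · rw [PySem.Dict.setdefault_of_contains _ _ hc]
  · rw [PySem.Dict.setdefault_of_not_contains _ _ (Bool.eq_false_iff.2 hc),
        PySem.Dict.insert_insert_self]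

-- ===== VERDICT (by name: the statement is the Claim_ definition above) =====
theorem filter_states_spec : Claim_equal_filter_states := by
  intro states _
  unfold Spec_filter_states filter_states filter_states_alt
  rw [pvBuildSeenB_eq]
  apply PySem.List.foldl_congr_mem
  intro acc pg hpg
  have hnd : pg.2.keys.Nodup := pvSeen_values_nodup states pg.1 pg.2 (by simpa using hpg)
  apply PySem.List.foldl_congr_mem
  intro res ki hki
  have hk : ki.1 ∈ pg.2.keys := by
    simp only [PySem.Dict.keys]
    exact List.mem_map.2 ⟨ki, hki, rfl⟩
  rw [pvCond pg.2 hnd ki.1 hk]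
  cases hA : (pg.2.keys.map pvCharSet).any (fun s => pvSetLt (pvCharSet ki.1) s) <;> simp
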